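-- pv_equiv track=rewrite | github.com/jaraco/sandbox | exercise.py | adjacent_indices
-- ===== SOURCE A (Python) =====
-- def adjacent_indices(array, position):
--     """
--     Find indexes into array adjacent to position.
--
--     Assumes square array
--     """
--     x, y = position
--     width, height = len(array), len(array[0])
--     return set(
--         (i, j)
--         for i in range(x-1, x+2)
--         for j in range(y-1, y+2)
--         if 0 <= i < width
--         and 0 <= j < height
--         and (i==x or j==y)
--         and (x, y) != (i, j)
--     )
-- ===== SOURCE B (Python) =====
-- def adjacent_indices(array, position):
--     """
--     Find indexes into array adjacent to position.
--
--     Assumes square array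
--     """
--     x, y = position
--     width, height = len(array), len(array[0])
--     deltas = [(-1, 0), (0, -1), (0, 1), (1, 0)]
--     return {
--         (x + dx, y + dy)
--         for dx, dy in deltas
--         if 0 <= x + dx < width and 0 <= y + dy < height
--     }
-- ===== Notes on version B (the rewrite author's own statement) =====
-- stated objective: simpler
-- what changed: B enumerates the four orthogonal offsets directly and bounds-checks each, instead of scanning the 3x3 neighbourhood and filtering out corners and the centre with the (i==x or j==y) and inequality tests.
import Mathlib
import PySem

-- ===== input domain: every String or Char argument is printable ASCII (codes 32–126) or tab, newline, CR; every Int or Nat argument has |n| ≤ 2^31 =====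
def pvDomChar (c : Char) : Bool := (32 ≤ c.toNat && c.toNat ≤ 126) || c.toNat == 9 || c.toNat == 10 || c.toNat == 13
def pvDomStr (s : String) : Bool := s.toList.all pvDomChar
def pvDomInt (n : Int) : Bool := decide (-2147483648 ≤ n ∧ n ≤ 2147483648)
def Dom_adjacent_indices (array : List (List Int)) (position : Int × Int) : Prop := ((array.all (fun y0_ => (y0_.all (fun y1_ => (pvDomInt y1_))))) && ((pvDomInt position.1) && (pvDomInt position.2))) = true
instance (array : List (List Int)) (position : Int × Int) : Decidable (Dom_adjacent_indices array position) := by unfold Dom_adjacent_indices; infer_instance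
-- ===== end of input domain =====

-- B replaces A's 3x3 scan with (i==x or j==y) and centre-exclusion filters by a direct
-- enumeration of the four orthogonal offsets, each only bounds-checked (objective: simpler).

-- ===== PORT A =====
def adjacent_indices (array : List (List Int)) (position : Int × Int) : List (Int × Int) :=
  let x := position.1
  let y := position.2
  let width : Int := (array.length : Int)
  let height : Int := ((array.headD []).length : Int)  -- array[0]; Pre_ excludes array = []
  PySem.Set.ofList (
    (PySem.List.pyRange (x - 1) (x + 2) 1).flatMap (fun i =>
      (PySem.List.pyRange (y - 1) (y + 2) 1).filterMap (fun j =>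
        if 0 ≤ i ∧ i < width ∧ 0 ≤ j ∧ j < height ∧ (i = x ∨ j = y) ∧ (x, y) ≠ (i, j)
        then some (i, j) else none)))

-- ===== PORT B =====
def adjacent_indices_alt (array : List (List Int)) (position : Int × Int) : List (Int × Int) :=
  let x := position.1
  let y := position.2
  let width : Int := (array.length : Int)
  let height : Int := ((array.headD []).length : Int)  -- array[0]; Pre_ excludes array = []
  let deltas : List (Int × Int) := [(-1, 0), (0, -1), (0, 1), (1, 0)]
  PySem.Set.ofList (deltas.filterMap (fun d =>
    if 0 ≤ x + d.1 ∧ x + d.1 < width ∧ 0 ≤ y + d.2 ∧ y + d.2 < height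
    then some (x + d.1, y + d.2) else none))

-- ===== PRECONDITION & SPEC =====
-- Pre_ excludes array = [], on which Python's len(array[0]) raises IndexError in both A and B.
def Pre_adjacent_indices (array : List (List Int)) (position : Int × Int) : Prop := array ≠ []
instance (array : List (List Int)) (position : Int × Int) : Decidable (Pre_adjacent_indices array position) := by unfold Pre_adjacent_indices; infer_instance
def pvWitness_adjacent_indices : List (List Int) × (Int × Int) := ([[1, 2], [3, 4]], (0, 1))
def Spec_adjacent_indices (array : List (List Int)) (position : Int × Int) (out : List (Int × Int)) : Prop := out = adjacent_indices_alt array position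
instance (array : List (List Int)) (position : Int × Int) (out : List (Int × Int)) : Decidable (Spec_adjacent_indices array position out) := by unfold Spec_adjacent_indices; infer_instance

-- ===== CLAIM (what is proved, stated in full; the proofs are below) =====
def Claim_equal_adjacent_indices : Prop := ∀ (array : List (List Int)) (position : Int × Int), Dom_adjacent_indices array position → Pre_adjacent_indices array position → Spec_adjacent_indices array position (adjacent_indices array position)

-- ===== LEMMAS AND PROOFS =====

theorem pyRange_three (a : Int) : PySem.List.pyRange a (a + 3) 1 = [a, a + 1, a + 2] := by
  rw [PySem.List.pyRange_one_cons (by omega), PySem.List.pyRange_one_cons (by omega),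
      PySem.List.pyRange_one_cons (by omega)]
  simp [PySem.List.pyRange]
  omega

-- ===== VERDICT (by name: the statement is the Claim_ definition above) =====
theorem adjacent_indices_spec : Claim_equal_adjacent_indices := by
  intro array position _ _
  unfold Spec_adjacent_indices adjacent_indices adjacent_indices_alt
  obtain ⟨x, y⟩ := position
  simp only
  have hx : x + 2 = (x - 1) + 3 := by ring
  have hy : y + 2 = (y - 1) + 3 := by ring
  rw [hx, hy, pyRange_three, pyRange_three]
  congr 1
  have e1 : x - 1 + 1 = x := by ring
  have e2 : x - 1 + 2 = x + 1 := by ring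
  have e3 : y - 1 + 1 = y := by ring
  have e4 : y - 1 + 2 = y + 1 := by ring
  rw [e1, e2, e3, e4]
  have r1 : x + -1 = x - 1 := by ring
  have r2 : y + -1 = y - 1 := by ring
  have n1 : x - 1 ≠ x := by omega
  have n2 : x ≠ x - 1 := by omega
  have n3 : x + 1 ≠ x := by omega
  have n4 : x ≠ x + 1 := by omega
  have n5 : y - 1 ≠ y := by omega
  have n6 : y ≠ y - 1 := by omega
  have n7 : y + 1 ≠ y := by omega
  have n8 : y ≠ y + 1 := by omega
  simp [List.flatMap_cons, List.filterMap_cons, r1, r2, n1, n2, n3, n4, n5, n6, n7, n8,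
        Prod.mk.injEq]
  split_ifs <;> rfl
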